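-- pv_equiv track=rewrite | github.com/mcalmeida13/math-machine-learning | ZTM-data-structure/bigO/bigO_exercise_1.py | funChallenge_v2
-- ===== SOURCE A (Python) =====
-- def anotherFunction():
--     # Independent what it is inside, this functions doesn't receive parameters, then it is O(1)
--     return 2
--
-- def funChallenge_v2(input):
--     a = 10 #O(1)
--     a = 50 + 3 #O(1)
--     # Because of this loop, funChallenge_v2 is O(N)
--     for i in range(len(input)):
--         anotherFunction()#O(N)
--         stranger = True #O(N)
--         a += 1#O(N)
--     return a#O(1)
-- ===== SOURCE B (Python) =====
-- def funChallenge_v2(input):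
--     # closed form: 53 plus one per element, no loop
--     return 53 + len(input)
-- ===== Notes on version B (the rewrite author's own statement) =====
-- stated objective: simpler
-- what changed: Replaces the O(N) accumulation loop (a += 1 per element, with dead calls) by the closed form 53 + len(input).
import Mathlib
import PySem

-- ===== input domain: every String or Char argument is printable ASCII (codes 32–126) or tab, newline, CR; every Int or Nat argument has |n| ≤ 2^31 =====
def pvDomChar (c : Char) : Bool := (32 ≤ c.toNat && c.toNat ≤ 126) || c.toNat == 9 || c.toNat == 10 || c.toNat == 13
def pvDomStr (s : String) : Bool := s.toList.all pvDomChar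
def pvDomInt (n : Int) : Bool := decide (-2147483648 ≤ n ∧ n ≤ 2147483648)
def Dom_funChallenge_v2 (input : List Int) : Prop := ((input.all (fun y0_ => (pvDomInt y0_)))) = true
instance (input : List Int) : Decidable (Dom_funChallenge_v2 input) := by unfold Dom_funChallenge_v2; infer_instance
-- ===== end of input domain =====

-- B replaces A's per-element `a += 1` loop by the closed form 53 + len(input) (simpler, O(1)).

-- ===== PORT A =====
-- A: a = 10; a = 53; for i in range(len(input)): anotherFunction(); stranger = True; a += 1; return a
def anotherFunction : Int := 2

def funChallenge_v2 (input : List Int) : Int :=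
  let a : Int := 10
  let a : Int := 50 + 3
  (PySem.List.pyRange 0 (input.length : Int) 1).foldl
    (fun a _i =>
      let _ := anotherFunction
      let _stranger := true
      a + 1) a

-- ===== PORT B =====
def funChallenge_v2_alt (input : List Int) : Int := 53 + (input.length : Int)

-- ===== PRECONDITION & SPEC =====
def Spec_funChallenge_v2 (input : List Int) (out : Int) : Prop := out = funChallenge_v2_alt input
instance (input : List Int) (out : Int) : Decidable (Spec_funChallenge_v2 input out) := by unfold Spec_funChallenge_v2; infer_instance

-- ===== CLAIM (what is proved, stated in full; the proofs are below) =====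
def Claim_equal_funChallenge_v2 : Prop := ∀ (input : List Int), Dom_funChallenge_v2 input → Spec_funChallenge_v2 input (funChallenge_v2 input)

-- ===== LEMMAS AND PROOFS =====
theorem pv_foldl_add_one (l : List Int) (a : Int) :
    l.foldl (fun a _ => let _ := anotherFunction; let _s := true; a + 1) a = a + l.length := by
  induction l generalizing a with
  | nil => simp
  | cons x xs ih => simp [List.foldl, ih]; ring

-- ===== VERDICT (by name: the statement is the Claim_ definition above) =====
theorem funChallenge_v2_spec : Claim_equal_funChallenge_v2 := by
  intro input _
  unfold Spec_funChallenge_v2 funChallenge_v2 funChallenge_v2_alt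
  rw [pv_foldl_add_one]
  simp [PySem.List.length_pyRange_one]
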